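-- pv_equiv track=rewrite | github.com/Howmany-Zeta/AI-Execute-Services | app/services/multi_task/workflows/dsl/dsl_parser.py | _validate_token_sequence
-- ===== SOURCE A (Python) =====
-- from typing import Dict, List, Any, Optional, Union
--
-- def _validate_token_sequence(tokens: List[str]) -> bool:
--     """Validate the sequence of tokens makes sense."""
--     if not tokens:
--         return False
--
--     # Remove whitespace tokens for sequence validation
--     non_ws_tokens = [t for t in tokens if t.strip()]
--
--     # Check for invalid operator sequences
--     for i in range(len(non_ws_tokens) - 1):
--         current = non_ws_tokens[i]
--         next_token = non_ws_tokens[i + 1]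
--
--         # Check for repeated logical operators
--         if current in ['and', 'or'] and next_token in ['and', 'or']:
--             return False
--
--         # Check for invalid operator combinations
--         if current in ['==', '!=', '<=', '>=', '<', '>'] and next_token in ['==', '!=', '<=', '>=', '<', '>']:
--             return False
--
--     return True
-- ===== SOURCE B (Python) =====
-- LOGICAL = ('and', 'or')
-- COMPARISON = ('==', '!=', '<=', '>=', '<', '>')
--
-- def _validate_token_sequence(tokens):
--     """Validate the sequence of tokens makes sense."""
--     if not tokens:
--         return False
--
--     non_ws = [t for t in tokens if t.strip()]
--
--     # Positions of each operator kind among the non-whitespace tokens.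
--     log_pos = [i for i, t in enumerate(non_ws) if t in LOGICAL]
--     cmp_pos = [i for i, t in enumerate(non_ws) if t in COMPARISON]
--
--     # Invalid exactly when two operators of the same kind sit at consecutive
--     # positions, i.e. the (sorted) position list contains a gap of 1.
--     return all(b - a != 1 for a, b in zip(log_pos, log_pos[1:])) and \
--            all(b - a != 1 for a, b in zip(cmp_pos, cmp_pos[1:]))
-- ===== Notes on version B (the rewrite author's own statement) =====
-- stated objective: alternative
-- what changed: B replaces A's early-returning adjacency scan over token pairs by an index-based formulation: it collects the position lists of logical and of comparison operators among the non-whitespace tokens and declares the sequence valid iff neither position list contains two consecutive indices (gap of 1).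
import Mathlib
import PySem

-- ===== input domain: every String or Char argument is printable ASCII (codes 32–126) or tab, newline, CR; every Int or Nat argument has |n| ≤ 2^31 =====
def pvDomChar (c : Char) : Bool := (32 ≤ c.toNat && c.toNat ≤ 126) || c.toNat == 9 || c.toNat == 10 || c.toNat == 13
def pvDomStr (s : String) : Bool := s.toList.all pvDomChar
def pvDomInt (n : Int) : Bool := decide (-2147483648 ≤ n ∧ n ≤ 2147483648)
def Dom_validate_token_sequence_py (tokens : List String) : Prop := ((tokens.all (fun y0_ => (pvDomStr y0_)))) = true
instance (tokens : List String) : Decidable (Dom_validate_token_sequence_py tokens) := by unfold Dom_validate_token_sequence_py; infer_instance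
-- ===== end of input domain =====

-- ===== PORT A =====
-- B restates A's adjacency scan as: neither operator kind's position list contains a
-- gap of 1 (alternative formulation, same cost; return value only).
def pyIsL (t : String) : Bool := t == "and" || t == "or"

def pyIsC (t : String) : Bool :=
  t == "==" || t == "!=" || t == "<=" || t == ">=" || t == "<" || t == ">"

-- the 'for i in range(len(non_ws_tokens) - 1)' loop with early returns
def vtsLoopA (l : List String) (n : Nat) (i : Nat) : Bool :=
  if _h : i < n then
    let current := l.getD i ""
    let next_token := l.getD (i + 1) ""
    if pyIsL current && pyIsL next_token then false
    else if pyIsC current && pyIsC next_token then false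
    else vtsLoopA l n (i + 1)
  else true
termination_by n - i

def validate_token_sequence_py (tokens : List String) : Bool :=
  if tokens.isEmpty then false
  else
    let non_ws_tokens := tokens.filter (fun t => !(PySem.Str.strip t == ""))
    vtsLoopA non_ws_tokens (non_ws_tokens.length - 1) 0

-- ===== PORT B =====
-- all(b - a != 1 for a, b in zip(l, l[1:]))
def gapChk : List Int → Bool
  | a :: b :: r => (!(b - a == 1)) && gapChk (b :: r)
  | _ => true

def validate_token_sequence_py_alt (tokens : List String) : Bool :=
  if tokens.isEmpty then false
  else
    let non_ws := tokens.filter (fun t => !(PySem.Str.strip t == ""))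
    let log_pos := ((PySem.List.enumerate non_ws).filter (fun p => pyIsL p.2)).map (·.1)
    let cmp_pos := ((PySem.List.enumerate non_ws).filter (fun p => pyIsC p.2)).map (·.1)
    gapChk log_pos && gapChk cmp_pos

-- ===== PRECONDITION & SPEC =====
def Spec_validate_token_sequence_py (tokens : List String) (out : Bool) : Prop := out = validate_token_sequence_py_alt tokens
instance (tokens : List String) (out : Bool) : Decidable (Spec_validate_token_sequence_py tokens out) := by unfold Spec_validate_token_sequence_py; infer_instance

-- ===== CLAIM (what is proved, stated in full; the proofs are below) =====
def Claim_equal_validate_token_sequence_py : Prop := ∀ (tokens : List String), Dom_validate_token_sequence_py tokens → Spec_validate_token_sequence_py tokens (validate_token_sequence_py tokens)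

-- ===== LEMMAS AND PROOFS =====

-- reference predicate: no two adjacent tokens both satisfy P
def adjOk (P : String → Bool) : List String → Bool
  | a :: b :: r => !(P a && P b) && adjOk P (b :: r)
  | _ => true

-- positions (from offset s) of the tokens satisfying P
def posIdx (P : String → Bool) : List String → Int → List Int
  | [], _ => []
  | t :: r, s => if P t then s :: posIdx P r (s + 1) else posIdx P r (s + 1)

lemma adjOk_cons_false (P : String → Bool) (b : String) (r : List String) (h : P b = false) :
    adjOk P (b :: r) = adjOk P r := by
  cases r with
  | nil => rfl
  | cons c r' => simp [adjOk, h]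

lemma efm (P : String → Bool) : ∀ (l : List String) (s : Int),
    ((PySem.List.enumerate l s).filter (fun p => P p.2)).map (·.1) = posIdx P l s
  | [], s => rfl
  | t :: r, s => by
    simp only [PySem.List.enumerate_cons, List.filter_cons]
    by_cases hP : P t <;> simp [hP, posIdx, efm P r (s + 1)]

lemma gap_cons (P : String → Bool) : ∀ (l : List String) (s k : Int), k + 2 ≤ s →
    gapChk (k :: posIdx P l s) = gapChk (posIdx P l s)
  | [], s, k, h => rfl
  | t :: r, s, k, h => by
    by_cases hP : P t
    · have hne : ¬ (s - k = 1) := by omega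
      simp [posIdx, hP, gapChk, hne]
    · simp only [posIdx, if_neg hP]
      exact gap_cons P r (s + 1) k (by omega)

lemma gap_pos (P : String → Bool) : ∀ (l : List String) (s : Int),
    gapChk (posIdx P l s) = adjOk P l
  | [], s => rfl
  | [a], s => by by_cases hP : P a <;> simp [posIdx, hP, gapChk, adjOk]
  | a :: b :: r, s => by
    by_cases ha : P a
    · by_cases hb : P b
      · simp [posIdx, ha, hb, gapChk, adjOk]
      · simp only [posIdx, if_pos ha, if_neg hb]
        rw [gap_cons P r (s + 1 + 1) s (by omega), gap_pos P r (s + 1 + 1),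
          show adjOk P (a :: b :: r) = adjOk P r by
            rw [show adjOk P (a :: b :: r) = (!(P a && P b) && adjOk P (b :: r)) from rfl,
              adjOk_cons_false P b r (by simpa using hb)]
            simp [hb]]
    · have e : posIdx P (a :: b :: r) s = posIdx P (b :: r) (s + 1) := by
        rw [posIdx, if_neg ha]
      rw [e, gap_pos P (b :: r) (s + 1), adjOk_cons_false P a (b :: r) (by simpa using ha)]
termination_by l => l.length

-- structural version of A's pairwise scan over the strings themselves
def vtsPairScan : List String → Bool
  | a :: b :: rest =>
    if pyIsL a && pyIsL b then false
    else if pyIsC a && pyIsC b then false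
    else vtsPairScan (b :: rest)
  | _ => true

lemma vtsLoopA_eq_pairScan (l : List String) (i : Nat) :
    vtsLoopA l (l.length - 1) i = vtsPairScan (l.drop i) := by
  rw [vtsLoopA]
  by_cases h : i < l.length - 1
  · have hi : i < l.length := by omega
    have hi1 : i + 1 < l.length := by omega
    rw [List.drop_eq_getElem_cons hi, List.drop_eq_getElem_cons hi1]
    simp only [h, dif_pos, vtsPairScan, List.getD_eq_getElem _ _ hi, List.getD_eq_getElem _ _ hi1]
    split
    · rfl
    · split
      · rfl
      · rw [vtsLoopA_eq_pairScan l (i + 1), List.drop_eq_getElem_cons hi1]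
  · simp only [h, dif_neg, not_false_iff]
    have hlen : (l.drop i).length ≤ 1 := by simp; omega
    match hd : l.drop i with
    | [] => rfl
    | [a] => rfl
    | a :: b :: rest => rw [hd] at hlen; simp at hlen
termination_by l.length - i

lemma pairScan_eq_adj : ∀ (l : List String),
    vtsPairScan l = (adjOk pyIsL l && adjOk pyIsC l)
  | [] => rfl
  | [a] => rfl
  | a :: b :: r => by
    simp only [vtsPairScan, adjOk]
    by_cases h1 : pyIsL a && pyIsL b <;> by_cases h2 : pyIsC a && pyIsC b <;>
      simp [h1, h2, pairScan_eq_adj (b :: r)]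

-- ===== VERDICT (by name: the statement is the Claim_ definition above) =====
theorem validate_token_sequence_py_spec : Claim_equal_validate_token_sequence_py := by
  intro tokens _
  unfold Spec_validate_token_sequence_py validate_token_sequence_py validate_token_sequence_py_alt
  by_cases h : tokens.isEmpty
  · simp [h]
  · simp only [h, if_neg, Bool.false_eq_true, not_false_iff]
    rw [vtsLoopA_eq_pairScan _ 0, List.drop_zero, pairScan_eq_adj,
      efm pyIsL, efm pyIsC, gap_pos, gap_pos]
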